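-- pv_equiv track=rewrite | github.com/akepa/advent-of-code | day18/day18b.py | build_node_to_colour
-- ===== SOURCE A (Python) =====
-- def build_node_to_colour(max_dims):
--     d = {}
--     count = 0
--     for x in range(0, max_dims["x"]):
--         for y in range(0, max_dims["y"]):
--             for z in range(0, max_dims["z"]):
--                 d[(x, y, z)] = count
--                 count += 1
--     return d
-- ===== SOURCE B (Python) =====
-- def build_node_to_colour(max_dims):
--     x_max = max_dims["x"]
--     if x_max <= 0:
--         return {}
--     y_max = max_dims["y"]
--     if y_max <= 0:
--         return {}
--     z_max = max_dims["z"]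
--     if z_max <= 0:
--         return {}
--     d = {}
--     for i in range(x_max * y_max * z_max):
--         x, r = divmod(i, y_max * z_max)
--         y, z = divmod(r, z_max)
--         d[(x, y, z)] = i
--     return d
-- ===== Notes on version B (the rewrite author's own statement) =====
-- stated objective: alternative
-- what changed: Replaces A's three nested coordinate loops threading a running counter with a single flat loop over range(x*y*z) that decodes each index into its (x, y, z) coordinates by divmod, so no accumulator is threaded and each entry is computed independently from its index.
import Mathlib
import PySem

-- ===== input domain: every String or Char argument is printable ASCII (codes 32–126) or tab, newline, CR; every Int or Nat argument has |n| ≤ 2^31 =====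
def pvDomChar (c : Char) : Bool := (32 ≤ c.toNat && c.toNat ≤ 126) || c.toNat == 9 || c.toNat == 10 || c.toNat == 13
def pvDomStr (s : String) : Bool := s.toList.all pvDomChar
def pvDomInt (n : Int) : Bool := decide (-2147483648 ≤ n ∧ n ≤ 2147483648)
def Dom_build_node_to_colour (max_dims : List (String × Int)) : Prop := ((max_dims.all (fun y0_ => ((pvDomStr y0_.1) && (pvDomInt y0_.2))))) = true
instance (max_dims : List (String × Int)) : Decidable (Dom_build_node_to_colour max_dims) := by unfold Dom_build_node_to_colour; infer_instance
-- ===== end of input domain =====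

-- B replaces A's three nested counter-threading loops by one flat loop over range(x*y*z)
-- that decodes each index into its coordinates with divmod (alternative decomposition, same cost).


-- ===== PORT A =====
-- d[(x,y,z)] = count; count += 1 inside three nested range loops; the dict is returned as its items list.
def build_node_to_colour (max_dims : List (String × Int)) : List (Int × Int × Int × Int) :=
  ((PySem.List.pyRange 0 (((PySem.Dict.mk max_dims).get? "x").getD 0)).foldl
      (fun st x =>
        (PySem.List.pyRange 0 (((PySem.Dict.mk max_dims).get? "y").getD 0)).foldl
          (fun st y =>
            (PySem.List.pyRange 0 (((PySem.Dict.mk max_dims).get? "z").getD 0)).foldl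
              (fun st z => (st.1.insert (x, y, z) st.2, st.2 + 1)) st) st)
      ((PySem.Dict.empty : PySem.Dict (Int × Int × Int) Int), (0 : Int))).1.items.map
    (fun p => (p.1.1, p.1.2.1, p.1.2.2, p.2))

-- ===== PORT B =====
-- single loop over range(x*y*z); each key decoded from the index with divmod.
def build_node_to_colour_alt (max_dims : List (String × Int)) : List (Int × Int × Int × Int) :=
  let x_max := ((PySem.Dict.mk max_dims).get? "x").getD 0
  if x_max ≤ 0 then []
  else
  let y_max := ((PySem.Dict.mk max_dims).get? "y").getD 0
  if y_max ≤ 0 then []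
  else
  let z_max := ((PySem.Dict.mk max_dims).get? "z").getD 0
  if z_max ≤ 0 then []
  else
    ((PySem.List.pyRange 0 (x_max * y_max * z_max)).foldl
        (fun d i =>
          d.insert (PySem.Int.floordiv i (y_max * z_max),
                    PySem.Int.floordiv (PySem.Int.mod i (y_max * z_max)) z_max,
                    PySem.Int.mod (PySem.Int.mod i (y_max * z_max)) z_max) i)
        (PySem.Dict.empty : PySem.Dict (Int × Int × Int) Int)).items.map
      (fun p => (p.1.1, p.1.2.1, p.1.2.2, p.2))

-- ===== PRECONDITION & SPEC =====
-- Pre_ excludes exactly the inputs on which Python A raises KeyError: a dimension key is missing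
-- and, because the lookups happen lazily inside the nested loops, it is actually reached.
def Pre_build_node_to_colour (max_dims : List (String × Int)) : Prop :=
  (PySem.Dict.mk max_dims).contains "x" = true ∧
  (((PySem.Dict.mk max_dims).get? "x").getD 0 ≤ 0 ∨
    ((PySem.Dict.mk max_dims).contains "y" = true ∧
      (((PySem.Dict.mk max_dims).get? "y").getD 0 ≤ 0 ∨
        (PySem.Dict.mk max_dims).contains "z" = true)))
instance (max_dims : List (String × Int)) : Decidable (Pre_build_node_to_colour max_dims) := by unfold Pre_build_node_to_colour; infer_instance
def pvWitness_build_node_to_colour : (List (String × Int)) := [("x", 1), ("y", 2), ("z", 2)]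

def Spec_build_node_to_colour (max_dims : List (String × Int)) (out : List (Int × Int × Int × Int)) : Prop := out = build_node_to_colour_alt max_dims
instance (max_dims : List (String × Int)) (out : List (Int × Int × Int × Int)) : Decidable (Spec_build_node_to_colour max_dims out) := by unfold Spec_build_node_to_colour; infer_instance

-- ===== CLAIM (what is proved, stated in full; the proofs are below) =====
def Claim_equal_build_node_to_colour : Prop := ∀ (max_dims : List (String × Int)), Dom_build_node_to_colour max_dims → Pre_build_node_to_colour max_dims → Spec_build_node_to_colour max_dims (build_node_to_colour max_dims)

-- ===== LEMMAS AND PROOFS =====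

-- the Nat form of B's divmod index decoder
def pvDec (m k : Nat) (i : Nat) : Int × Int × Int :=
  (((i / (m * k) : Nat) : Int), ((i % (m * k) / k : Nat) : Int), ((i % (m * k) % k : Nat) : Int))

theorem pvDec_inj (m k : Nat) : Function.Injective (pvDec m k) := by
  intro i j h
  simp only [pvDec, Prod.mk.injEq, Nat.cast_inj] at h
  obtain ⟨h1, h2, h3⟩ := h
  have di := Nat.div_add_mod i (m * k)
  have dj := Nat.div_add_mod j (m * k)
  have di2 := Nat.div_add_mod (i % (m * k)) k
  have dj2 := Nat.div_add_mod (j % (m * k)) k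
  have e1 : (m * k) * (i / (m * k)) = (m * k) * (j / (m * k)) := by rw [h1]
  have e2 : k * (i % (m * k) / k) = k * (j % (m * k) / k) := by rw [h2]
  omega

theorem pv_enum_append {α : Type} (l₁ l₂ : List α) (s : Int) :
    PySem.List.enumerate (l₁ ++ l₂) s = PySem.List.enumerate l₁ s ++ PySem.List.enumerate l₂ (s + l₁.length) := by
  induction l₁ generalizing s with
  | nil => simp [PySem.List.enumerate_nil]
  | cons x xs ih =>
      simp [PySem.List.enumerate_cons, ih]
      ring_nf

theorem pv_enum_map_range {α : Type} (f : Nat → α) (n : Nat) :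
    PySem.List.enumerate ((List.range n).map f) 0 = (List.range n).map (fun i : Nat => ((i : Int), f i)) := by
  induction n with
  | zero => simp [PySem.List.enumerate_nil]
  | succ n ih =>
      rw [List.range_succ]
      simp only [List.map_append, List.map_cons, List.map_nil]
      rw [pv_enum_append, ih]
      simp [PySem.List.enumerate_cons, PySem.List.enumerate_nil]

-- A's counter loop over a duplicate-free key list: the dict collects (key, position) pairs
theorem pv_foldA : ∀ (l : List (Int × Int × Int)) (d : PySem.Dict (Int × Int × Int) Int) (c : Int),
    l.Nodup → (∀ t ∈ l, d.contains t = false) →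
    (l.foldl (fun st t => (st.1.insert t st.2, st.2 + 1)) (d, c)).1.items
      = d.items ++ (PySem.List.enumerate l c).map (fun p => (p.2, p.1)) := by
  intro l
  induction l with
  | nil => intro d c _ _; simp [PySem.List.enumerate_nil]
  | cons t l ih =>
      intro d c hnd hf
      rw [List.nodup_cons] at hnd
      have hft : d.contains t = false := hf t (by simp)
      simp only [List.foldl_cons]
      rw [ih (d.insert t c) (c + 1) hnd.2 (by
        intro t' ht'
        rw [PySem.Dict.contains_insert]
        have hne : t' ≠ t := fun he => hnd.1 (he ▸ ht')
        simp [hne, hf t' (by simp [ht'])])]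
      rw [PySem.Dict.items_insert_of_not_contains _ _ hft]
      simp [PySem.List.enumerate_cons]

-- range (m*k) decoded by divmod is the 2-level product
theorem pvL2 (k : Nat) : ∀ m : Nat,
    (List.range (m * k)).map (fun j : Nat => (((j / k : Nat) : Int), ((j % k : Nat) : Int)))
      = (List.range m).flatMap (fun b => (List.range k).map (fun c : Nat => (((b : Nat) : Int), ((c : Nat) : Int)))) := by
  intro m
  induction m with
  | zero => simp
  | succ m ih =>
      rw [Nat.succ_mul, List.range_add, List.map_append, ih, List.range_succ, List.flatMap_append]
      congr 1
      rw [List.map_map, List.flatMap_cons, List.flatMap_nil, List.append_nil]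
      apply List.map_congr_left
      intro c hc
      rw [List.mem_range] at hc
      have hk : 0 < k := Nat.pos_of_ne_zero (by omega)
      have hdiv : (m * k + c) / k = m := by
        rw [Nat.mul_comm m k, Nat.mul_add_div hk, Nat.div_eq_of_lt hc, Nat.add_zero]
      have hmod : (m * k + c) % k = c := by
        rw [Nat.mul_comm m k, Nat.mul_add_mod, Nat.mod_eq_of_lt hc]
      simp [Function.comp, hdiv, hmod]

-- range (n*m*k) decoded by pvDec is the 3-level product
theorem pvL1 (m k : Nat) : ∀ n : Nat,
    (List.range (n * (m * k))).map (pvDec m k)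
      = (List.range n).flatMap (fun a => (List.range m).flatMap (fun b =>
          (List.range k).map (fun c : Nat => (((a : Nat) : Int), ((b : Nat) : Int), ((c : Nat) : Int))))) := by
  intro n
  induction n with
  | zero => simp
  | succ n ih =>
      rw [Nat.succ_mul, List.range_add, List.map_append, ih, List.range_succ, List.flatMap_append]
      congr 1
      rw [List.flatMap_cons, List.flatMap_nil, List.append_nil, List.map_map]
      have step : (List.range (m * k)).map (pvDec m k ∘ (fun x => n * (m * k) + x))
          = ((List.range (m * k)).map (fun j : Nat => (((j / k : Nat) : Int), ((j % k : Nat) : Int)))).map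
              (fun p => (((n : Nat) : Int), p.1, p.2)) := by
        rw [List.map_map]
        apply List.map_congr_left
        intro j hj
        rw [List.mem_range] at hj
        have hmk : 0 < m * k := Nat.pos_of_ne_zero (by omega)
        have hdiv : (n * (m * k) + j) / (m * k) = n := by
          rw [Nat.mul_comm n (m * k), Nat.mul_add_div hmk, Nat.div_eq_of_lt hj, Nat.add_zero]
        have hmod : (n * (m * k) + j) % (m * k) = j := by
          rw [Nat.mul_comm n (m * k), Nat.mul_add_mod, Nat.mod_eq_of_lt hj]
        simp [pvDec, Function.comp, hdiv, hmod]
      rw [step, pvL2, List.map_flatMap]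
      simp [List.map_map, Function.comp_def]

theorem pv_pyRange0 (X : Int) : PySem.List.pyRange 0 X = (List.range X.toNat).map (fun k : Nat => (k : Int)) := by
  simp [PySem.List.pyRange_one]

-- A's result in closed form: the decoded flat range, with the index as value
theorem pvA_eq (max_dims : List (String × Int)) :
    build_node_to_colour max_dims
      = (List.range ((((PySem.Dict.mk max_dims).get? "x").getD 0).toNat *
          ((((PySem.Dict.mk max_dims).get? "y").getD 0).toNat * (((PySem.Dict.mk max_dims).get? "z").getD 0).toNat))).map
          (fun i : Nat =>
            ((pvDec (((PySem.Dict.mk max_dims).get? "y").getD 0).toNat (((PySem.Dict.mk max_dims).get? "z").getD 0).toNat i).1,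
             (pvDec (((PySem.Dict.mk max_dims).get? "y").getD 0).toNat (((PySem.Dict.mk max_dims).get? "z").getD 0).toNat i).2.1,
             (pvDec (((PySem.Dict.mk max_dims).get? "y").getD 0).toNat (((PySem.Dict.mk max_dims).get? "z").getD 0).toNat i).2.2,
             (i : Int))) := by
  set X := ((PySem.Dict.mk max_dims).get? "x").getD 0 with hX
  set Y := ((PySem.Dict.mk max_dims).get? "y").getD 0 with hY
  set Z := ((PySem.Dict.mk max_dims).get? "z").getD 0 with hZ
  unfold build_node_to_colour
  rw [← hX, ← hY, ← hZ]
  have hnest :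
      (PySem.List.pyRange 0 X).foldl
        (fun st x => (PySem.List.pyRange 0 Y).foldl
          (fun st y => (PySem.List.pyRange 0 Z).foldl
            (fun st z => (st.1.insert (x, y, z) st.2, st.2 + 1)) st) st)
        ((PySem.Dict.empty : PySem.Dict (Int × Int × Int) Int), (0 : Int))
      = ((PySem.List.pyRange 0 X).flatMap (fun x => (PySem.List.pyRange 0 Y).flatMap (fun y =>
          (PySem.List.pyRange 0 Z).map (fun z => (x, y, z))))).foldl
          (fun st t => (st.1.insert t st.2, st.2 + 1))
          ((PySem.Dict.empty : PySem.Dict (Int × Int × Int) Int), (0 : Int)) := by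
    rw [List.foldl_flatMap]
    congr 1
    funext st x
    rw [List.foldl_flatMap]
    congr 1
    funext st y
    rw [List.foldl_map]
  have hprod :
      (PySem.List.pyRange 0 X).flatMap (fun x => (PySem.List.pyRange 0 Y).flatMap (fun y =>
          (PySem.List.pyRange 0 Z).map (fun z => (x, y, z))))
      = (List.range (X.toNat * (Y.toNat * Z.toNat))).map (pvDec Y.toNat Z.toNat) := by
    rw [pv_pyRange0 X, pv_pyRange0 Y, pv_pyRange0 Z, pvL1]
    rw [List.flatMap_map]
    congr 1
    funext a
    rw [List.flatMap_map]
    congr 1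
    funext b
    rw [List.map_map]
    simp [Function.comp_def]
  simp only [hnest, hprod]
  rw [pv_foldA _ _ _ ((List.nodup_range).map (pvDec_inj _ _)) (by intro t _; rw [PySem.Dict.contains_empty])]
  rw [pv_enum_map_range]
  simp [List.map_map, Function.comp_def, PySem.Dict.empty]

-- ===== VERDICT (by name: the statement is the Claim_ definition above) =====
theorem build_node_to_colour_spec : Claim_equal_build_node_to_colour := by
  intro max_dims _ _
  unfold Spec_build_node_to_colour
  set X := ((PySem.Dict.mk max_dims).get? "x").getD 0 with hX
  set Y := ((PySem.Dict.mk max_dims).get? "y").getD 0 with hY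
  set Z := ((PySem.Dict.mk max_dims).get? "z").getD 0 with hZ
  rw [pvA_eq]
  unfold build_node_to_colour_alt
  rw [← hX, ← hY, ← hZ]
  by_cases hgx : X ≤ 0
  · rw [if_pos hgx, Int.toNat_eq_zero.mpr hgx, Nat.zero_mul]
    simp
  rw [if_neg hgx]
  by_cases hgy : Y ≤ 0
  · rw [if_pos hgy, Int.toNat_eq_zero.mpr hgy, Nat.zero_mul, Nat.mul_zero]
    simp
  rw [if_neg hgy]
  by_cases hgz : Z ≤ 0
  · rw [if_pos hgz, Int.toNat_eq_zero.mpr hgz, Nat.mul_zero, Nat.mul_zero]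
    simp
  rw [if_neg hgz]
  have hx : 0 < X := lt_of_not_ge hgx
  have hy : 0 < Y := lt_of_not_ge hgy
  have hz : 0 < Z := lt_of_not_ge hgz
  have hXc : X = (X.toNat : Int) := (Int.toNat_of_nonneg (le_of_lt hx)).symm
  have hYc : Y = (Y.toNat : Int) := (Int.toNat_of_nonneg (le_of_lt hy)).symm
  have hZc : Z = (Z.toNat : Int) := (Int.toNat_of_nonneg (le_of_lt hz)).symm
  have hmul : X * Y * Z = ((X.toNat * (Y.toNat * Z.toNat) : Nat) : Int) := by
    conv_lhs => rw [hXc, hYc, hZc]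
    push_cast; ring
  rw [hmul, PySem.List.pyRange_zero_nat, List.foldl_map]
  have hfun : (fun (d : PySem.Dict (Int × Int × Int) Int) (k : Nat) =>
      d.insert (PySem.Int.floordiv (k : Int) (Y * Z),
                PySem.Int.floordiv (PySem.Int.mod (k : Int) (Y * Z)) Z,
                PySem.Int.mod (PySem.Int.mod (k : Int) (Y * Z)) Z) (k : Int))
      = (fun (d : PySem.Dict (Int × Int × Int) Int) (k : Nat) =>
          d.insert (pvDec Y.toNat Z.toNat k) (k : Int)) := by
    funext d k
    have hYZ : Y * Z = ((Y.toNat * Z.toNat : Nat) : Int) := by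
      conv_lhs => rw [hYc, hZc]
      push_cast; ring
    rw [hYZ]
    conv_lhs => rw [hZc]
    simp only [pvDec, PySem.Int.floordiv_natCast, PySem.Int.mod_natCast]
    simp
  rw [hfun]
  rw [PySem.Dict.items_foldl_insert_fresh _ _ _ _
    (by intro a _; rw [PySem.Dict.contains_empty])
    ((List.nodup_range).map (pvDec_inj _ _))]
  simp [List.map_map, Function.comp_def, PySem.Dict.empty]
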